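-- pv_equiv track=rewrite | github.com/Lut99/CookieFactory | World.py | split_commandline
-- ===== SOURCE A (Python) =====
-- def split_commandline(text):
--     command = ""
--     args = []
--     quote_mode = False
--     for i in range(len(text)):
--         c = text[i]
--         if c == "\"" and (i == 0 or text[i - 1] != "\\"):
--             quote_mode = not quote_mode
--         elif not quote_mode and c == ' ' and (i == 0 or text[i - 1] != "\\"):
--             args.append("")
--         else:
--             if len(args) == 0:
--                 command += c
--             else:
--                 args[-1] += c
--     return command,args
-- ===== SOURCE B (Python) =====
-- def split_commandline(text):
--     # Stage 1: one scan producing a flat marked string: unescaped quotes toggle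
--     # quote mode and vanish, unescaped spaces outside quotes become a sentinel.
--     marked = []
--     quote_mode = False
--     for prev, c in zip("\0" + text, text):
--         if c == '"' and prev != "\\":
--             quote_mode = not quote_mode
--         elif c == ' ' and not quote_mode and prev != "\\":
--             marked.append("\0")
--         else:
--             marked.append(c)
--     # Stage 2: the library splits the marked string into the tokens.
--     tokens = "".join(marked).split("\0")
--     return tokens[0], tokens[1:]
-- ===== Notes on version B (the rewrite author's own statement) =====
-- stated objective: alternative
-- what changed: B is a staged pipeline: one scan rewrites the text into a flat marked string (unescaped quotes dropped, unescaped separator spaces replaced by a NUL sentinel), then str.split on the sentinel produces all tokens at once and tokens[0]/tokens[1:] are returned, replacing A's in-loop command/args accumulation with its len(args)==0 special case.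
import Mathlib
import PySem

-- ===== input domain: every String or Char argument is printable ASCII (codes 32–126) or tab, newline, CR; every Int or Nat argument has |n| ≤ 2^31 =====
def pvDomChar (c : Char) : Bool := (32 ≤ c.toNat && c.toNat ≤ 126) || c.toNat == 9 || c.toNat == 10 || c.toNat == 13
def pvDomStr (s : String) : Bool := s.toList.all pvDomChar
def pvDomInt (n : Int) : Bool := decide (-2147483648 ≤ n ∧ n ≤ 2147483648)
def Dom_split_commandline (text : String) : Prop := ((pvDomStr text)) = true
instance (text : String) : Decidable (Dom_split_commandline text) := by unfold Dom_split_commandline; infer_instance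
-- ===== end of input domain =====

-- B replaces A's in-loop command/args accumulation by a staged pipeline: one scan
-- produces a flat marked string (unescaped quotes dropped, separators replaced by a
-- NUL sentinel), then the library split does the tokenization (different decomposition).

-- ===== PORT A =====
-- for i in range(len(text)): c = text[i], looking back at text[i-1]; state (command, args, quote_mode).
-- (indices produced by range are always in bounds, so getD's default is never used)
def split_commandline (text : String) : String × List String :=
  let cs := text.toList
  let st := (List.range cs.length).foldl
    (fun (st : String × List String × Bool) i =>
      let command := st.1; let args := st.2.1; let quote_mode := st.2.2
      let c := cs.getD i ' '
      if c == '"' && (i == 0 || cs.getD (i - 1) ' ' != '\\') then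
        (command, args, !quote_mode)
      else if !quote_mode && c == ' ' && (i == 0 || cs.getD (i - 1) ' ' != '\\') then
        (command, args ++ [""], quote_mode)
      else if args.isEmpty then
        (command.push c, args, quote_mode)
      else
        (command, args.dropLast ++ [args.getLast!.push c], quote_mode))
    ("", [], false)
  (st.1, st.2.1)

-- ===== PORT B =====
-- for prev, c in zip("\0" + text, text): build the marked char list (state (marked, quote_mode));
-- then "".join(marked).split("\0") and return tokens[0], tokens[1:]
def split_commandline_alt (text : String) : String × List String :=
  let cs := text.toList
  let st := (List.zip ('\x00' :: cs) cs).foldl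
    (fun (st : List Char × Bool) pc =>
      let marked := st.1; let quote_mode := st.2
      let prev := pc.1; let c := pc.2
      if c == '"' && prev != '\\' then
        (marked, !quote_mode)
      else if c == ' ' && !quote_mode && prev != '\\' then
        (marked ++ ['\x00'], quote_mode)
      else
        (marked ++ [c], quote_mode))
    ([], false)
  let tokens := (PySem.Chars.splitOn st.1 ['\x00']).map (fun t => String.ofList t)
  (tokens.headD "", tokens.tail)

-- ===== PRECONDITION & SPEC =====
def Spec_split_commandline (text : String) (out : String × List String) : Prop := out = split_commandline_alt text
instance (text : String) (out : String × List String) : Decidable (Spec_split_commandline text out) := by unfold Spec_split_commandline; infer_instance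

-- ===== CLAIM (what is proved, stated in full; the proofs are below) =====
def Claim_equal_split_commandline : Prop := ∀ (text : String), Dom_split_commandline text → Spec_split_commandline text (split_commandline text)

-- ===== LEMMAS AND PROOFS =====

-- A's loop body with the i==0 / text[i-1] test replaced by an explicit previous-character
-- parameter ('\x00' stands for "no previous character"; NUL is outside the domain).
def stepA (prev c : Char) (st : String × List String × Bool) :
    String × List String × Bool :=
  let command := st.1; let args := st.2.1; let quote_mode := st.2.2
  if c == '"' && prev != '\\' then
    (command, args, !quote_mode)
  else if !quote_mode && c == ' ' && prev != '\\' then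
    (command, args ++ [""], quote_mode)
  else if args.isEmpty then
    (command.push c, args, quote_mode)
  else
    (command, args.dropLast ++ [args.getLast!.push c], quote_mode)

def recA (prev : Char) (cs : List Char) (st : String × List String × Bool) :
    String × List String × Bool :=
  match cs with
  | [] => st
  | c :: rest => recA c rest (stepA prev c st)

-- the marked char list B's first stage produces, as a structural recursion
def mkMarked (prev : Char) (q : Bool) : List Char → List Char
  | [] => []
  | c :: rest =>
      if c == '"' && prev != '\\' then mkMarked c (!q) rest
      else if c == ' ' && !q && prev != '\\' then '\x00' :: mkMarked c q rest
      else c :: mkMarked c q rest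

-- the token structure both programs compute: (continuation of the current token, later tokens)
def tk (prev : Char) (q : Bool) : List Char → List Char × List (List Char)
  | [] => ([], [])
  | c :: rest =>
      if c == '"' && prev != '\\' then tk c (!q) rest
      else if c == ' ' && !q && prev != '\\' then
        (([] : List Char), (tk c q rest).1 :: (tk c q rest).2)
      else
        (c :: (tk c q rest).1, (tk c q rest).2)

-- splitOn with a single-char separator, as a structural recursion (cur is reversed, as in splitOn.go)
def spNul (l : List Char) (cur : List Char) : List (List Char) :=
  match l with
  | [] => [cur.reverse]
  | c :: rest => if c = '\x00' then cur.reverse :: spNul rest [] else spNul rest (c :: cur)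

theorem go_eq_spNul (fuel : Nat) (l cur : List Char) (acc : List (List Char))
    (h : l.length < fuel) :
    PySem.Chars.splitOn.go ['\x00'] fuel l cur acc = acc.reverse ++ spNul l cur := by
  induction fuel generalizing l cur acc with
  | zero => omega
  | succ fuel ih =>
    cases l with
    | nil => simp [PySem.Chars.splitOn.go, spNul]
    | cons c rest =>
      rw [PySem.Chars.splitOn.go]
      by_cases hc : c = '\x00'
      · subst hc
        have hp : List.isPrefixOf ['\x00'] ('\x00' :: rest) = true := by
          simp [List.isPrefixOf]
        rw [if_pos hp]
        simp only [List.length_cons] at h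
        rw [ih _ _ _ (by simpa using h)]
        simp [spNul]
      · have hp : List.isPrefixOf ['\x00'] (c :: rest) = false := by
          simp [List.isPrefixOf]; exact fun hh => (hc hh.symm).elim
        rw [if_neg (by simp [hp])]
        simp only [List.length_cons] at h
        rw [ih _ _ _ (by omega)]
        simp [spNul, hc]

theorem splitOn_eq_spNul (l : List Char) :
    PySem.Chars.splitOn l ['\x00'] = spNul l [] := by
  rw [PySem.Chars.splitOn, go_eq_spNul _ _ _ _ (by omega)]; simp

theorem spNul_mkMarked (cs : List Char) :
    ∀ (prev : Char) (q : Bool) (cur : List Char), '\x00' ∉ cs →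
    spNul (mkMarked prev q cs) cur = (cur.reverse ++ (tk prev q cs).1) :: (tk prev q cs).2 := by
  induction cs with
  | nil => intro prev q cur _; simp [mkMarked, tk, spNul]
  | cons c rest ih =>
    intro prev q cur hmem
    have hc : c ≠ '\x00' := by intro hh; exact hmem (hh ▸ List.mem_cons_self)
    have hrest : '\x00' ∉ rest := fun hh => hmem (List.mem_cons_of_mem _ hh)
    rw [mkMarked, tk]
    by_cases h1 : (c == '"' && prev != '\\') = true
    · rw [if_pos h1, if_pos h1]; exact ih c (!q) cur hrest
    · rw [if_neg h1, if_neg h1]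
      by_cases h2 : (c == ' ' && !q && prev != '\\') = true
      · rw [if_pos h2, if_pos h2]
        rw [spNul, if_pos rfl, ih c q [] hrest]
        simp
      · rw [if_neg h2, if_neg h2]
        rw [spNul, if_neg hc, ih c q (c :: cur) hrest]
        simp

-- string helpers for the A-side invariant
theorem append_ofList_nil (s : String) : s ++ String.ofList [] = s := by
  apply String.toList_inj.mp; simp

theorem append_ofList_cons (s : String) (c : Char) (l : List Char) :
    s ++ String.ofList (c :: l) = (s.push c) ++ String.ofList l := by
  apply String.toList_inj.mp; simp

-- the i==0/text[i-1] test at position pre.length equals the previous-character test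
theorem cond_eq (pre : List Char) (suf : List Char) :
    ((pre.length == 0 : Bool) || (pre ++ suf).getD (pre.length - 1) ' ' != '\\')
      = (pre.getLastD '\x00' != '\\') := by
  cases pre using List.reverseRecOn with
  | nil => simp
  | append_singleton p x _ =>
    have hx : (p ++ [x] ++ suf).getD p.length ' ' = x := by
      simp [List.getD]
    rw [hx] at *
    simp [bne]

theorem getD_here (pre : List Char) (c : Char) (rest : List Char) :
    (pre ++ c :: rest).getD pre.length ' ' = c := by
  simp [List.getD]

-- A's index-based fold over a suffix equals the prev-carrying recursion
theorem rangeFold_eq_recA (cs : List Char) (suf : List Char) :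
    ∀ (pre : List Char) (st : String × List String × Bool), cs = pre ++ suf →
    (List.range' pre.length suf.length).foldl
      (fun (st : String × List String × Bool) i =>
        let command := st.1; let args := st.2.1; let quote_mode := st.2.2
        let c := cs.getD i ' '
        if c == '"' && (i == 0 || cs.getD (i - 1) ' ' != '\\') then
          (command, args, !quote_mode)
        else if !quote_mode && c == ' ' && (i == 0 || cs.getD (i - 1) ' ' != '\\') then
          (command, args ++ [""], quote_mode)
        else if args.isEmpty then
          (command.push c, args, quote_mode)
        else
          (command, args.dropLast ++ [args.getLast!.push c], quote_mode))
      st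
    = recA (pre.getLastD '\x00') suf st := by
  induction suf with
  | nil => intro pre st _; simp [recA]
  | cons c rest ih =>
    intro pre st hcs
    have hc : cs.getD pre.length ' ' = c := by rw [hcs]; exact getD_here pre c rest
    have hcond : ((pre.length == 0 : Bool) || cs.getD (pre.length - 1) ' ' != '\\')
        = (pre.getLastD '\x00' != '\\') := by rw [hcs]; exact cond_eq pre (c :: rest)
    have hrec : cs = (pre ++ [c]) ++ rest := by rw [hcs]; simp
    have hih := ih (pre ++ [c]) (stepA (pre.getLastD '\x00') c st) hrec
    have hlast : (pre ++ [c]).getLastD '\x00' = c := by simp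
    rw [hlast] at hih
    rw [List.length_cons, List.range'_succ, List.foldl_cons,
      show pre.length + 1 = (pre ++ [c]).length by simp]
    show _ = recA c rest (stepA (pre.getLastD '\x00') c st)
    rw [← hih]
    congr 1
    simp only [hc, hcond, stepA]

-- getLast!/dropLast facts for nonempty token lists
theorem getLast!_concat (l : List String) (x : String) : (l ++ [x]).getLast! = x := by
  cases l with
  | nil => rfl
  | cons a as => simp [List.getLast!]

theorem getLast!_cons (x : String) (l : List String) :
    (x :: l).getLast! = (x :: l).getLast (by simp) := by
  simp [List.getLast!]

theorem cons_dropLast_getLast! (x : String) (l : List String) :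
    (x :: l).dropLast ++ [(x :: l).getLast!] = x :: l := by
  rw [getLast!_cons]
  exact List.dropLast_concat_getLast (by simp)

-- A's recursion computes the token structure tk, merged onto the tokens built so far
theorem recA_tokens (cs : List Char) :
    ∀ (prev : Char) (command : String) (args : List String) (q : Bool),
    (recA prev cs (command, args, q)).1 :: (recA prev cs (command, args, q)).2.1
      = (command :: args).dropLast
        ++ (((command :: args).getLast! ++ String.ofList (tk prev q cs).1)
            :: ((tk prev q cs).2.map (fun t => String.ofList t))) := by
  induction cs with
  | nil =>
    intro prev command args q
    simp only [recA, tk]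
    rw [append_ofList_nil, List.map_nil]
    exact (cons_dropLast_getLast! command args).symm
  | cons c rest ih =>
    intro prev command args q
    rw [recA, tk]
    by_cases h1 : (c == '"' && prev != '\\') = true
    · rw [if_pos h1]
      rw [show stepA prev c (command, args, q) = (command, args, !q) by
        simp only [stepA]; rw [if_pos h1]]
      exact ih c command args (!q)
    · rw [if_neg h1]
      by_cases h2 : (c == ' ' && !q && prev != '\\') = true
      · rw [if_pos h2]
        have h2' : (!q && c == ' ' && prev != '\\') = true := by
          simp only [Bool.and_assoc] at h2 ⊢
          cases hcq : (c == ' ') <;> cases hq : q <;> simp_all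
        rw [show stepA prev c (command, args, q) = (command, args ++ [""], q) by
          simp only [stepA]; rw [if_neg h1, if_pos h2']]
        rw [ih c command (args ++ [""]) q]
        rw [show command :: (args ++ [""]) = (command :: args) ++ [""] from (List.cons_append ..).symm]
        rw [List.dropLast_concat, getLast!_concat]
        rw [show ("" : String) ++ String.ofList (tk c q rest).1
              = String.ofList (tk c q rest).1 by apply String.toList_inj.mp; simp]
        rw [append_ofList_nil]
        calc (command :: args) ++ (String.ofList (tk c q rest).1
                :: List.map (fun t => String.ofList t) (tk c q rest).2)
            = ((command :: args).dropLast ++ [(command :: args).getLast!])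
              ++ (String.ofList (tk c q rest).1
                :: List.map (fun t => String.ofList t) (tk c q rest).2) := by
              rw [cons_dropLast_getLast!]
          _ = _ := by simp
      · rw [if_neg h2]
        have h2' : (!q && c == ' ' && prev != '\\') = false := by
          simp only [Bool.and_assoc] at h2 ⊢
          cases hcq : (c == ' ') <;> cases hq : q <;> simp_all
        cases args with
        | nil =>
          rw [show stepA prev c (command, [], q) = (command.push c, [], q) by
            simp only [stepA]; rw [if_neg h1, if_neg (by simp [h2']), if_pos (by simp)]]
          rw [ih c (command.push c) [] q]
          rw [show ([command.push c] : List String).getLast! = command.push c from rfl,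
            show ([command] : List String).getLast! = command from rfl,
            append_ofList_cons]
          rfl
        | cons a as =>
          rw [show stepA prev c (command, a :: as, q)
                = (command, (a :: as).dropLast ++ [(a :: as).getLast!.push c], q) by
            simp only [stepA]; rw [if_neg h1, if_neg (by simp [h2']), if_neg (by simp)]]
          rw [ih c command ((a :: as).dropLast ++ [(a :: as).getLast!.push c]) q]
          rw [show command :: ((a :: as).dropLast ++ [(a :: as).getLast!.push c])
                = (command :: (a :: as).dropLast) ++ [(a :: as).getLast!.push c] from
              (List.cons_append ..).symm]
          rw [List.dropLast_concat, getLast!_concat]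
          rw [show (command :: a :: as).getLast! = (a :: as).getLast! by
            rw [getLast!_cons, getLast!_cons]; simp [List.getLast_cons]]
          rw [show (command :: a :: as).dropLast = command :: (a :: as).dropLast by simp]
          rw [← append_ofList_cons]

-- the quote state after B's first stage
def qFin (prev : Char) (q : Bool) : List Char → Bool
  | [] => q
  | c :: rest =>
      if c == '"' && prev != '\\' then qFin c (!q) rest
      else qFin c q rest

-- B's first-stage fold equals mkMarked
theorem foldB_eq_mkMarked (cs : List Char) :
    ∀ (prev : Char) (acc : List Char) (q : Bool),
    (List.zip (prev :: cs) cs).foldl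
      (fun (st : List Char × Bool) pc =>
        let marked := st.1; let quote_mode := st.2
        let prev := pc.1; let c := pc.2
        if c == '"' && prev != '\\' then
          (marked, !quote_mode)
        else if c == ' ' && !quote_mode && prev != '\\' then
          (marked ++ ['\x00'], quote_mode)
        else
          (marked ++ [c], quote_mode))
      (acc, q)
    = (acc ++ mkMarked prev q cs, qFin prev q cs) := by
  induction cs with
  | nil => intro prev acc q; simp [mkMarked, qFin]
  | cons c rest ih =>
    intro prev acc q
    rw [List.zip_cons_cons, List.foldl_cons, mkMarked, qFin]
    by_cases h1 : (c == '"' && prev != '\\') = true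
    · rw [show (if c == '"' && prev != '\\' then ((acc, q).1, !(acc, q).2)
            else if c == ' ' && !(acc, q).2 && prev != '\\' then ((acc, q).1 ++ ['\x00'], (acc, q).2)
            else ((acc, q).1 ++ [c], (acc, q).2)) = (acc, !q) by rw [if_pos h1]]
      rw [if_pos h1, ih c acc (!q)]
      simp [h1]
    · by_cases h2 : (c == ' ' && !q && prev != '\\') = true
      · rw [show (if c == '"' && prev != '\\' then ((acc, q).1, !(acc, q).2)
              else if c == ' ' && !(acc, q).2 && prev != '\\' then ((acc, q).1 ++ ['\x00'], (acc, q).2)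
              else ((acc, q).1 ++ [c], (acc, q).2)) = (acc ++ ['\x00'], q) by
            rw [if_neg h1, if_pos h2]]
        rw [if_neg h1, if_pos h2, ih c (acc ++ ['\x00']) q]
        simp [h1]
      · rw [show (if c == '"' && prev != '\\' then ((acc, q).1, !(acc, q).2)
              else if c == ' ' && !(acc, q).2 && prev != '\\' then ((acc, q).1 ++ ['\x00'], (acc, q).2)
              else ((acc, q).1 ++ [c], (acc, q).2)) = (acc ++ [c], q) by
            rw [if_neg h1, if_neg h2]]
        rw [if_neg h1, if_neg h2, ih c (acc ++ [c]) q]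
        simp [h1]

-- ===== VERDICT (by name: the statement is the Claim_ definition above) =====
theorem split_commandline_spec : Claim_equal_split_commandline := by
  intro text hdom
  unfold Spec_split_commandline
  show split_commandline text = split_commandline_alt text
  have h0 : '\x00' ∉ text.toList := by
    intro hmem
    have := List.all_eq_true.mp hdom _ hmem
    simp [pvDomChar] at this
  -- A side
  simp only [split_commandline, List.range_eq_range']
  have hA := rangeFold_eq_recA text.toList text.toList [] ("", [], false) (by simp)
  simp only [List.length_nil, List.getLastD_nil] at hA
  rw [hA]
  have hT := recA_tokens text.toList '\x00' "" [] false
  rw [show (("" : String) :: ([] : List String)).dropLast = [] from rfl,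
    show (("" : String) :: ([] : List String)).getLast! = "" from rfl,
    String.empty_append, List.nil_append] at hT
  rw [List.cons.injEq] at hT
  -- B side
  simp only [split_commandline_alt]
  rw [foldB_eq_mkMarked text.toList '\x00' [] false]
  simp only [List.nil_append]
  rw [splitOn_eq_spNul, spNul_mkMarked text.toList '\x00' false [] h0]
  simp only [List.reverse_nil, List.nil_append, List.map_cons, List.headD_cons, List.tail_cons]
  exact Prod.ext hT.1 hT.2
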